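-- pv_equiv track=rewrite | github.com/c-suryaprakashkappagantula-tech/TestSuiteGenerator | modules/endpoint_tc_generator.py | _is_likely_typo
-- ===== SOURCE A (Python) =====
-- def _is_likely_typo(path_a: str, path_b: str) -> bool:
--     """Check if two paths differ by only 1-2 characters (likely a typo).
--     e.g., /api/acount/lines vs /api/account/lines"""
--     if abs(len(path_a) - len(path_b)) > 2:
--         return False
--     # Split into segments and compare
--     segs_a = path_a.strip('/').split('/')
--     segs_b = path_b.strip('/').split('/')
--     if len(segs_a) != len(segs_b):
--         return False
--     diff_count = 0
--     for sa, sb in zip(segs_a, segs_b):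
--         if sa != sb:
--             diff_count += 1
--             # Check edit distance of the differing segment
--             if _edit_distance(sa, sb) > 2:
--                 return False
--     return diff_count == 1
--
-- def _edit_distance(s1: str, s2: str) -> int:
--     """Simple Levenshtein edit distance."""
--     if len(s1) < len(s2):
--         return _edit_distance(s2, s1)
--     if len(s2) == 0:
--         return len(s1)
--     prev_row = range(len(s2) + 1)
--     for i, c1 in enumerate(s1):
--         curr_row = [i + 1]
--         for j, c2 in enumerate(s2):
--             insertions = prev_row[j + 1] + 1
--             deletions = curr_row[j] + 1
--             substitutions = prev_row[j] + (c1 != c2)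
--             curr_row.append(min(insertions, deletions, substitutions))
--         prev_row = curr_row
--     return prev_row[-1]
-- ===== SOURCE B (Python) =====
-- def _is_likely_typo(path_a: str, path_b: str) -> bool:
--     """Check if two paths differ by only 1-2 characters (likely a typo)."""
--     if abs(len(path_a) - len(path_b)) > 2:
--         return False
--     segs_a = path_a.strip('/').split('/')
--     segs_b = path_b.strip('/').split('/')
--     if len(segs_a) != len(segs_b):
--         return False
--     diffs = [(sa, sb) for sa, sb in zip(segs_a, segs_b) if sa != sb]
--     if len(diffs) != 1:
--         return False
--     sa, sb = diffs[0]
--     # bounded edit-distance check: lev(sa, sb) <= 2, in O(len) time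
--     return _within(sa, sb, len(sa), len(sb), 2)
--
-- def _within(a, b, i, j, k):
--     """True iff the Levenshtein distance of a[:i] and b[:j] is <= k."""
--     while i > 0 and j > 0 and a[i - 1] == b[j - 1]:
--         i -= 1
--         j -= 1
--     if i == 0:
--         return j <= k
--     if j == 0:
--         return i <= k
--     if k == 0:
--         return False
--     return (_within(a, b, i - 1, j, k - 1)
--             or _within(a, b, i, j - 1, k - 1)
--             or _within(a, b, i - 1, j - 1, k - 1))
-- ===== Notes on version B (the rewrite author's own statement) =====
-- stated objective: faster
-- what changed: Replaces the full O(n*m) dynamic-programming Levenshtein computation with a budget-bounded check (common-suffix stripping plus at most two branching levels) that decides 'edit distance <= 2' in linear time, and replaces the counting loop with a single filter of the differing segment pairs.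
import Mathlib
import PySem

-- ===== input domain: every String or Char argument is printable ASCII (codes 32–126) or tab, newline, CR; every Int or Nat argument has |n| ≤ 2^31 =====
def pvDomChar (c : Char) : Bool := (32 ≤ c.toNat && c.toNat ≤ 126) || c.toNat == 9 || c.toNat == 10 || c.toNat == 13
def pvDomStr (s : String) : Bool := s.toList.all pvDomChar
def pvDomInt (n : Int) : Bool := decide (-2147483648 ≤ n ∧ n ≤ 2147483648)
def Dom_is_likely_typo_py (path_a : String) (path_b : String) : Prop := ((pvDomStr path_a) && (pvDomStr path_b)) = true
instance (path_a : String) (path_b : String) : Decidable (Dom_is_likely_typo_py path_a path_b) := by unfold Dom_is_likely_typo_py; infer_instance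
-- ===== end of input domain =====

-- B replaces A's full O(n·m) dynamic-programming Levenshtein computation by a linear-time
-- budget-2 bounded check (strip common suffix, branch at most twice); equivalence of the
-- return values is proved below.

-- ===== PORT A =====
-- `_edit_distance`'s DP body (the branch after the argument swap); rows hold Python ints.
def pvEdistBody (s1 : List Char) (s2 : List Char) : Int :=
  if s2.length = 0 then (s1.length : Int)
  else
    let prev :=
      (PySem.List.enumerate s1 0).foldl (fun prow ic =>
        (PySem.List.enumerate s2 0).foldl (fun cr jc =>
          let ins := PySem.List.pyGetD prow (jc.1 + 1) 0 + 1
          let del := PySem.List.pyGetD cr jc.1 0 + 1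
          let sub := PySem.List.pyGetD prow jc.1 0 + (if ic.2 ≠ jc.2 then (1 : Int) else 0)
          cr ++ [min ins (min del sub)]) [ic.1 + 1])
        (PySem.List.pyRange 0 ((s2.length : Int) + 1) 1)
    PySem.List.pyGetD prev (-1) 0   -- prev_row[-1]; prev is never empty in this branch

-- `_edit_distance`: its one recursive call only swaps the arguments, after which the
-- swap test is false; so it equals the DP body on the (possibly swapped) pair.
def pvEdist (s1 : String) (s2 : String) : Int :=
  if PySem.Str.len s1 < PySem.Str.len s2 then pvEdistBody s2.toList s1.toList
  else pvEdistBody s1.toList s2.toList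

-- the for-loop of `_is_likely_typo` (the early `return False` becomes returning false)
def pvALoop : List (String × String) → Int → Bool
  | [], diff_count => diff_count == 1
  | (sa, sb) :: rest, diff_count =>
    if sa ≠ sb then
      if pvEdist sa sb > 2 then false else pvALoop rest (diff_count + 1)
    else pvALoop rest diff_count

def is_likely_typo_py (path_a : String) (path_b : String) : Bool :=
  if (PySem.Str.len path_a - PySem.Str.len path_b).natAbs > 2 then false
  else
    let segs_a := (PySem.Str.split? (PySem.Str.stripChars path_a "/") "/").getD []   -- sep "/" ≠ "", split? is `some`
    let segs_b := (PySem.Str.split? (PySem.Str.stripChars path_b "/") "/").getD []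
    if segs_a.length ≠ segs_b.length then false
    else pvALoop (segs_a.zip segs_b) 0

-- ===== PORT B =====
-- the while-loop of `_within`: strip the longest common suffix of a[:i] and b[:j]
def pvSkip (a b : List Char) : Nat → Nat → Nat × Nat
  | i + 1, j + 1 =>
    if a.getD i ' ' = b.getD j ' ' then pvSkip a b i j else (i + 1, j + 1)
  | i, j => (i, j)

-- `_within a b i j k`: is the Levenshtein distance of a[:i] and b[:j] at most k?
def pvWithin (a b : List Char) (i j k : Nat) : Bool :=
  let ij := pvSkip a b i j
  if ij.1 = 0 then decide (ij.2 ≤ k)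
  else if ij.2 = 0 then decide (ij.1 ≤ k)
  else match k with
    | 0 => false
    | k' + 1 =>
      pvWithin a b (ij.1 - 1) ij.2 k' || pvWithin a b ij.1 (ij.2 - 1) k' ||
        pvWithin a b (ij.1 - 1) (ij.2 - 1) k'
termination_by k

def is_likely_typo_py_alt (path_a : String) (path_b : String) : Bool :=
  if (PySem.Str.len path_a - PySem.Str.len path_b).natAbs > 2 then false
  else
    let segs_a := (PySem.Str.split? (PySem.Str.stripChars path_a "/") "/").getD []   -- sep "/" ≠ "", split? is `some`
    let segs_b := (PySem.Str.split? (PySem.Str.stripChars path_b "/") "/").getD []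
    if segs_a.length ≠ segs_b.length then false
    else
      let diffs := (segs_a.zip segs_b).filter (fun p => p.1 != p.2)
      if diffs.length ≠ 1 then false
      else
        let p := diffs.headD ("", "")   -- diffs[0]; diffs has length 1 here
        pvWithin p.1.toList p.2.toList p.1.toList.length p.2.toList.length 2

-- ===== PRECONDITION & SPEC =====
def Spec_is_likely_typo_py (path_a : String) (path_b : String) (out : Bool) : Prop := out = is_likely_typo_py_alt path_a path_b
instance (path_a : String) (path_b : String) (out : Bool) : Decidable (Spec_is_likely_typo_py path_a path_b out) := by unfold Spec_is_likely_typo_py; infer_instance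

-- ===== CLAIM (what is proved, stated in full; the proofs are below) =====
def Claim_equal_is_likely_typo_py : Prop := ∀ (path_a : String) (path_b : String), Dom_is_likely_typo_py path_a path_b → Spec_is_likely_typo_py path_a path_b (is_likely_typo_py path_a path_b)

-- ===== LEMMAS AND PROOFS =====

-- the Levenshtein distance of a[:i] and b[:j] (the prefix recurrence A's DP table fills in)
def pvLev (u v : List Char) : Nat → Nat → Nat
  | 0, j => j
  | i + 1, 0 => i + 1
  | i + 1, j + 1 =>
    min (pvLev u v i (j + 1) + 1)
      (min (pvLev u v (i + 1) j + 1)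
        (pvLev u v i j + (if u.getD i ' ' = v.getD j ' ' then 0 else 1)))
termination_by i j => (i, j)

theorem pvLev_zero_right (u v : List Char) (i : Nat) : pvLev u v i 0 = i := by
  cases i <;> simp [pvLev]

theorem pvLev_lb (u v : List Char) : ∀ n i j, i + j = n → i - j ≤ pvLev u v i j ∧ j - i ≤ pvLev u v i j := by
  intro n
  induction n using Nat.strong_induction_on with
  | _ n ih =>
    intro i j hn
    match i, j with
    | 0, j => simp [pvLev]
    | i + 1, 0 => simp [pvLev]
    | i + 1, j + 1 =>
      have h1 := ih (i + (j+1)) (by omega) i (j+1) rfl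
      have h2 := ih ((i+1) + j) (by omega) (i+1) j rfl
      have h3 := ih (i + j) (by omega) i j rfl
      simp only [pvLev]
      split <;> omega

theorem pvLev_le_succ_right (u v : List Char) : ∀ i j, pvLev u v i j ≤ pvLev u v i (j + 1) + 1 := by
  intro i
  induction i with
  | zero => intro j; simp [pvLev]; omega
  | succ i ih =>
    intro j
    cases j with
    | zero =>
      have := (pvLev_lb u v ((i+1)+(0+1)) (i+1) (0+1) rfl).1
      have h0 := pvLev_zero_right u v (i+1)
      omega
    | succ j =>
      have hA := ih (j + 1)
      have hlev1 : pvLev u v (i+1) (j+1) = min (pvLev u v i (j + 1) + 1)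
        (min (pvLev u v (i + 1) j + 1) (pvLev u v i j + (if u.getD i ' ' = v.getD j ' ' then 0 else 1))) := by
        simp [pvLev]
      have hlev2 : pvLev u v (i+1) (j+1+1) = min (pvLev u v i (j + 1 + 1) + 1)
        (min (pvLev u v (i + 1) (j+1) + 1) (pvLev u v i (j+1) + (if u.getD i ' ' = v.getD (j+1) ' ' then 0 else 1))) := by
        simp [pvLev]
      split_ifs at hlev1 hlev2 <;> omega

theorem pvLev_le_succ_left (u v : List Char) : ∀ j i, pvLev u v i j ≤ pvLev u v (i + 1) j + 1 := by
  intro j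
  induction j with
  | zero => intro i; simp [pvLev_zero_right]; omega
  | succ j ih =>
    intro i
    cases i with
    | zero =>
      have := (pvLev_lb u v ((0+1)+(j+1)) (0+1) (j+1) rfl).2
      have h0 : pvLev u v 0 (j+1) = j+1 := by simp [pvLev]
      omega
    | succ i =>
      have hA := ih (i + 1)
      have hlev1 : pvLev u v (i+1) (j+1) = min (pvLev u v i (j + 1) + 1)
        (min (pvLev u v (i + 1) j + 1) (pvLev u v i j + (if u.getD i ' ' = v.getD j ' ' then 0 else 1))) := by
        simp [pvLev]
      have hlev2 : pvLev u v (i+1+1) (j+1) = min (pvLev u v (i+1) (j + 1) + 1)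
        (min (pvLev u v (i + 1 + 1) j + 1) (pvLev u v (i+1) j + (if u.getD (i+1) ' ' = v.getD j ' ' then 0 else 1))) := by
        simp [pvLev]
      split_ifs at hlev1 hlev2 <;> omega

theorem pvLev_eq_char (u v : List Char) (i j : Nat) (h : u.getD i ' ' = v.getD j ' ') :
    pvLev u v (i + 1) (j + 1) = pvLev u v i j := by
  have h1 := pvLev_le_succ_right u v i j
  have h2 := pvLev_le_succ_left u v j i
  simp only [pvLev]
  rw [if_pos h]
  omega

theorem pvLev_pos (u v : List Char) (i j : Nat) (h : ¬ u.getD i ' ' = v.getD j ' ') :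
    1 ≤ pvLev u v (i + 1) (j + 1) := by
  simp only [pvLev]
  rw [if_neg h]
  omega

theorem pvLev_comm (u v : List Char) : ∀ n i j, i + j = n → pvLev u v i j = pvLev v u j i := by
  intro n
  induction n using Nat.strong_induction_on with
  | _ n ih =>
    intro i j hn
    match i, j with
    | 0, j => simp [pvLev, pvLev_zero_right]
    | i + 1, 0 => simp [pvLev, pvLev_zero_right]
    | i + 1, j + 1 =>
      have h1 := ih (i + (j+1)) (by omega) i (j+1) rfl
      have h2 := ih ((i+1) + j) (by omega) (i+1) j rfl
      have h3 := ih (i + j) (by omega) i j rfl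
      simp only [pvLev]
      rw [show (if u.getD i ' ' = v.getD j ' ' then (0:Nat) else 1) = (if v.getD j ' ' = u.getD i ' ' then (0:Nat) else 1) from by simp only [eq_comm]]
      generalize (if v.getD j ' ' = u.getD i ' ' then (0:Nat) else 1) = t
      omega

theorem pvSkip_spec (a b : List Char) : ∀ n i j, i + j = n →
    pvLev a b (pvSkip a b i j).1 (pvSkip a b i j).2 = pvLev a b i j ∧
    ((pvSkip a b i j).1 = 0 ∨ (pvSkip a b i j).2 = 0 ∨
      ¬ a.getD ((pvSkip a b i j).1 - 1) ' ' = b.getD ((pvSkip a b i j).2 - 1) ' ') := by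
  intro n
  induction n using Nat.strong_induction_on with
  | _ n ih =>
    intro i j hn
    match i, j with
    | 0, j =>
      rw [pvSkip.eq_2 a b 0 j (by omega)]
      exact ⟨rfl, Or.inl rfl⟩
    | i + 1, 0 =>
      rw [pvSkip.eq_2 a b (i+1) 0 (by omega)]
      exact ⟨rfl, Or.inr (Or.inl rfl)⟩
    | i + 1, j + 1 =>
      rw [pvSkip.eq_1]
      by_cases h : a.getD i ' ' = b.getD j ' '
      · rw [if_pos h]
        have := ih (i + j) (by omega) i j rfl
        exact ⟨by rw [this.1, pvLev_eq_char a b i j h], this.2⟩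
      · rw [if_neg h]
        exact ⟨rfl, Or.inr (Or.inr (by simpa using h))⟩

theorem pvWithin_correct (a b : List Char) : ∀ k i j, pvWithin a b i j k = decide (pvLev a b i j ≤ k) := by
  intro k
  induction k with
  | zero =>
    intro i j
    obtain ⟨hlev, hpost⟩ := pvSkip_spec a b (i + j) i j rfl
    rw [pvWithin]
    rcases Nat.eq_zero_or_pos (pvSkip a b i j).1 with h1 | h1
    · simp only [h1]
      rw [h1] at hlev
      simp only [pvLev] at hlev
      simp [← hlev]
    · rw [if_neg (by omega)]
      rcases Nat.eq_zero_or_pos (pvSkip a b i j).2 with h2 | h2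
      · simp only [h2]
        rw [h2, pvLev_zero_right] at hlev
        simp [← hlev]
      · rw [if_neg (by omega)]
        obtain ⟨i', hi'⟩ : ∃ i', (pvSkip a b i j).1 = i' + 1 := ⟨_, (Nat.succ_pred_eq_of_pos h1).symm⟩
        obtain ⟨j', hj'⟩ : ∃ j', (pvSkip a b i j).2 = j' + 1 := ⟨_, (Nat.succ_pred_eq_of_pos h2).symm⟩
        have hne : ¬ a.getD i' ' ' = b.getD j' ' ' := by
          rcases hpost with h | h | h
          · omega
          · omega
          · rwa [hi', hj'] at h
        have := pvLev_pos a b i' j' hne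
        rw [hi', hj'] at hlev
        simp [← hlev]
        omega
  | succ k ihk =>
    intro i j
    obtain ⟨hlev, hpost⟩ := pvSkip_spec a b (i + j) i j rfl
    rw [pvWithin]
    rcases Nat.eq_zero_or_pos (pvSkip a b i j).1 with h1 | h1
    · simp only [h1]
      rw [h1] at hlev
      simp only [pvLev] at hlev
      simp [← hlev]
    · rw [if_neg (by omega)]
      rcases Nat.eq_zero_or_pos (pvSkip a b i j).2 with h2 | h2
      · simp only [h2]
        rw [h2, pvLev_zero_right] at hlev
        simp [← hlev]
      · rw [if_neg (by omega)]
        obtain ⟨i', hi'⟩ : ∃ i', (pvSkip a b i j).1 = i' + 1 := ⟨_, (Nat.succ_pred_eq_of_pos h1).symm⟩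
        obtain ⟨j', hj'⟩ : ∃ j', (pvSkip a b i j).2 = j' + 1 := ⟨_, (Nat.succ_pred_eq_of_pos h2).symm⟩
        have hne : ¬ a.getD i' ' ' = b.getD j' ' ' := by
          rcases hpost with h | h | h
          · omega
          · omega
          · rwa [hi', hj'] at h
        rw [hi', hj'] at hlev
        have hrec : pvLev a b (i' + 1) (j' + 1) =
            min (pvLev a b i' (j' + 1) + 1)
              (min (pvLev a b (i' + 1) j' + 1) (pvLev a b i' j' + 1)) := by
          simp only [pvLev]
          rw [if_neg hne]
        simp only [hi', hj']
        rw [ihk, ihk, ihk]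
        simp only [Nat.add_sub_cancel]
        rw [Bool.eq_iff_iff]
        simp only [Bool.or_eq_true, decide_eq_true_eq]
        omega

theorem pvGetD_of_drop {α : Type} [Inhabited α] (u : List α) (i : Nat) (c : α) (t : List α)
    (h : u.drop i = c :: t) (d : α) : u.getD i d = c := by
  have h0 : u[i]? = some c := by
    have h' : (u.drop i)[0]? = some c := by simp [h]
    rw [List.getElem?_drop] at h'
    simpa using h'
  simp [List.getD_eq_getElem?_getD, h0]

theorem pvInnerStep (u v : List Char) (i : Nat) (c : Char) (hc : u.getD i ' ' = c) :
    ∀ (w : List Char) (j : Nat), v.drop j = w → j ≤ v.length →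
    (PySem.List.enumerate w (j : Int)).foldl (fun cr jc =>
        let ins := PySem.List.pyGetD ((List.range (v.length + 1)).map (fun t => (pvLev u v i t : Int))) (jc.1 + 1) 0 + 1
        let del := PySem.List.pyGetD cr jc.1 0 + 1
        let sub := PySem.List.pyGetD ((List.range (v.length + 1)).map (fun t => (pvLev u v i t : Int))) jc.1 0 + (if c ≠ jc.2 then (1 : Int) else 0)
        cr ++ [min ins (min del sub)])
      ((List.range (j + 1)).map (fun t => (pvLev u v (i + 1) t : Int)))
    = (List.range (v.length + 1)).map (fun t => (pvLev u v (i + 1) t : Int)) := by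
  intro w
  induction w with
  | nil =>
    intro j hj hjle
    have hlen := congrArg List.length hj
    simp [List.length_drop] at hlen
    have hjl : j = v.length := by omega
    subst hjl
    simp [PySem.List.enumerate]
  | cons c2 w' ihw =>
    intro j hj hjle
    have hjlt : j < v.length := by
      have := congrArg List.length hj
      simp [List.length_drop] at this
      omega
    have hc2 : v.getD j ' ' = c2 := pvGetD_of_drop v j c2 w' hj ' '
    have hw' : v.drop (j + 1) = w' := by
      have h2 := congrArg (List.drop 1) hj
      rw [List.drop_drop] at h2
      simpa [Nat.add_comm] using h2
    rw [PySem.List.enumerate_cons, List.foldl_cons]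
    have hacc : ((List.range (j + 1)).map (fun t => (pvLev u v (i + 1) t : Int))) ++
        [min (PySem.List.pyGetD ((List.range (v.length + 1)).map (fun t => (pvLev u v i t : Int))) (((j : Int)) + 1) 0 + 1)
          (min (PySem.List.pyGetD ((List.range (j + 1)).map (fun t => (pvLev u v (i + 1) t : Int))) ((j : Int)) 0 + 1)
            (PySem.List.pyGetD ((List.range (v.length + 1)).map (fun t => (pvLev u v i t : Int))) ((j : Int)) 0 + (if c ≠ c2 then (1 : Int) else 0)))]
        = (List.range (j + 1 + 1)).map (fun t => (pvLev u v (i + 1) t : Int)) := by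
      have e1 : PySem.List.pyGetD ((List.range (v.length + 1)).map (fun t => (pvLev u v i t : Int))) (((j : Int)) + 1) 0 = (pvLev u v i (j + 1) : Int) := by
        rw [show ((j : Int) + 1) = ((j + 1 : Nat) : Int) by push_cast; ring]
        rw [PySem.List.pyGetD_natCast, PySem.List.getD_map_range _ _ _ _ (by omega)]
      have e2 : PySem.List.pyGetD ((List.range (j + 1)).map (fun t => (pvLev u v (i + 1) t : Int))) ((j : Int)) 0 = (pvLev u v (i + 1) j : Int) := by
        rw [PySem.List.pyGetD_natCast, PySem.List.getD_map_range _ _ _ _ (by omega)]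
      have e3 : PySem.List.pyGetD ((List.range (v.length + 1)).map (fun t => (pvLev u v i t : Int))) ((j : Int)) 0 = (pvLev u v i j : Int) := by
        rw [PySem.List.pyGetD_natCast, PySem.List.getD_map_range _ _ _ _ (by omega)]
      rw [e1, e2, e3]
      have e4 : (if c ≠ c2 then (1 : Int) else 0) = ((if u.getD i ' ' = v.getD j ' ' then 0 else 1 : Nat) : Int) := by
        rw [hc, hc2]
        by_cases h : c = c2 <;> simp [h]
      rw [e4]
      have e5 : min ((pvLev u v i (j + 1) : Int) + 1)
          (min ((pvLev u v (i + 1) j : Int) + 1) ((pvLev u v i j : Int) + ((if u.getD i ' ' = v.getD j ' ' then 0 else 1 : Nat) : Int)))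
          = (pvLev u v (i + 1) (j + 1) : Int) := by
        simp only [pvLev]
        push_cast
        omega
      rw [e5, List.range_succ (n := j + 1)]
      simp
    rw [show ((j : Int) + 1) = ((j + 1 : Nat) : Int) by push_cast; ring] at hacc ⊢
    rw [hacc]
    exact ihw (j + 1) hw' (by omega)

theorem pvOuterStep (u v : List Char) : ∀ (w : List Char) (i : Nat), u.drop i = w → i ≤ u.length →
    (PySem.List.enumerate w (i : Int)).foldl (fun prow ic =>
        (PySem.List.enumerate v 0).foldl (fun cr jc =>
          let ins := PySem.List.pyGetD prow (jc.1 + 1) 0 + 1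
          let del := PySem.List.pyGetD cr jc.1 0 + 1
          let sub := PySem.List.pyGetD prow jc.1 0 + (if ic.2 ≠ jc.2 then (1 : Int) else 0)
          cr ++ [min ins (min del sub)]) [ic.1 + 1])
      ((List.range (v.length + 1)).map (fun t => (pvLev u v i t : Int)))
    = (List.range (v.length + 1)).map (fun t => (pvLev u v u.length t : Int)) := by
  intro w
  induction w with
  | nil =>
    intro i hi hile
    have hlen := congrArg List.length hi
    simp [List.length_drop] at hlen
    have : i = u.length := by omega
    subst this
    simp [PySem.List.enumerate]
  | cons c w' ihw =>
    intro i hi hile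
    have hilt : i < u.length := by
      have := congrArg List.length hi
      simp [List.length_drop] at this
      omega
    have hc : u.getD i ' ' = c := pvGetD_of_drop u i c w' hi ' '
    have hw' : u.drop (i + 1) = w' := by
      have h2 := congrArg (List.drop 1) hi
      rw [List.drop_drop] at h2
      simpa [Nat.add_comm] using h2
    rw [PySem.List.enumerate_cons, List.foldl_cons]
    have hstart : [((i : Int)) + 1] = (List.range (0 + 1)).map (fun t => (pvLev u v (i + 1) t : Int)) := by
      simp [pvLev_zero_right]
    have hinner := pvInnerStep u v i c hc v 0 rfl (by omega)
    simp only [Nat.cast_zero] at hinner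
    rw [hstart, hinner]
    have : ((i : Int)) + 1 = (((i + 1 : Nat)) : Int) := by push_cast; ring
    rw [this]
    exact ihw (i + 1) hw' (by omega)

theorem pvEdistBody_eq (a b : List Char) : pvEdistBody a b = (pvLev a b a.length b.length : Int) := by
  unfold pvEdistBody
  by_cases h : b.length = 0
  · rw [if_pos h, h, pvLev_zero_right]
  · rw [if_neg h]
    have hrange : PySem.List.pyRange 0 ((b.length : Int) + 1) 1 =
        (List.range (b.length + 1)).map (fun t => (pvLev a b 0 t : Int)) := by
      rw [show ((b.length : Int) + 1) = (((b.length + 1 : Nat)) : Int) by push_cast; ring]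
      rw [PySem.List.pyRange_zero_natCast]
      refine List.map_congr_left ?_
      intro t ht
      simp [pvLev]
    have houter := pvOuterStep a b a 0 rfl (by omega)
    simp only [Nat.cast_zero] at houter
    rw [hrange]
    rw [houter]
    have hlast : ((List.range (b.length + 1)).map (fun t => (pvLev a b a.length t : Int))).getLast?.getD 0
        = (pvLev a b a.length b.length : Int) := by
      rw [List.range_succ]
      simp
    unfold PySem.List.pyGetD
    simp only []
    rw [PySem.List.pyGet?_neg_one]
    exact hlast

theorem pvEdist_eq (s1 s2 : String) :
    pvEdist s1 s2 = (pvLev s1.toList s2.toList s1.toList.length s2.toList.length : Int) := by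
  unfold pvEdist
  by_cases h : PySem.Str.len s1 < PySem.Str.len s2
  · rw [if_pos h, pvEdistBody_eq,
      pvLev_comm s2.toList s1.toList (s2.toList.length + s1.toList.length) _ _ rfl]
  · rw [if_neg h, pvEdistBody_eq]

theorem pvALoop_char : ∀ (ps : List (String × String)) (dc : Int),
    pvALoop ps dc =
      (decide (dc + (ps.countP (fun p => p.1 != p.2) : Int) = 1) &&
        ps.all (fun p => p.1 == p.2 || !(pvEdist p.1 p.2 > 2))) := by
  intro ps
  induction ps with
  | nil =>
    intro dc
    simp only [pvALoop, List.countP_nil, Nat.cast_zero, add_zero, List.all_nil, Bool.and_true]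
    by_cases h : dc = 1 <;> simp [h]
  | cons p rest ih =>
    intro dc
    obtain ⟨sa, sb⟩ := p
    by_cases hne : sa ≠ sb
    · by_cases hd : pvEdist sa sb > 2
      · rw [show pvALoop ((sa, sb) :: rest) dc = false from by rw [pvALoop, if_pos hne, if_pos hd]]
        simp [List.all_cons, hne, hd]
      · rw [show pvALoop ((sa, sb) :: rest) dc = pvALoop rest (dc + 1) from by
          rw [pvALoop, if_pos hne, if_neg hd]]
        rw [ih]
        simp only [List.countP_cons, List.all_cons]
        have hb : (fun p : String × String => p.1 != p.2) (sa, sb) = true := by simpa using hne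
        simp [hb, hd]
        ring_nf
    · rw [not_not] at hne
      subst hne
      rw [show pvALoop ((sa, sa) :: rest) dc = pvALoop rest dc from by
        rw [pvALoop]; simp]
      rw [ih]
      simp [List.all_cons]

theorem pvShell_eq (ps : List (String × String)) :
    pvALoop ps 0 =
      (if (ps.filter (fun p => p.1 != p.2)).length ≠ 1 then false
       else
        let p := (ps.filter (fun p => p.1 != p.2)).headD ("", "")
        pvWithin p.1.toList p.2.toList p.1.toList.length p.2.toList.length 2) := by
  rw [pvALoop_char]
  rw [← List.countP_eq_length_filter]
  by_cases hc : ps.countP (fun p => p.1 != p.2) = 1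
  · rw [if_neg (by omega)]
    have hfl : (ps.filter (fun p => p.1 != p.2)).length = 1 := by
      rw [← List.countP_eq_length_filter]; exact hc
    obtain ⟨x, hx⟩ := List.length_eq_one_iff.mp hfl
    have hxf : x ∈ ps.filter (fun p => p.1 != p.2) := by rw [hx]; exact List.mem_singleton_self x
    have hxmem : x ∈ ps := List.mem_of_mem_filter hxf
    have hxne : x.1 ≠ x.2 := by
      have := (List.mem_filter.mp hxf).2
      simpa using this
    simp only [hx, List.headD_cons]
    rw [pvWithin_correct]
    rw [hc]
    norm_num
    rw [Bool.eq_iff_iff]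
    simp only [List.all_eq_true, Bool.or_eq_true, beq_iff_eq, Bool.not_eq_true', decide_eq_true_eq, decide_eq_false_iff_not]
    constructor
    · intro hall
      have hp := hall x hxmem
      rcases hp with h | h
      · exact absurd h hxne
      · have he := pvEdist_eq x.1 x.2
        rw [he] at h
        have : (pvLev x.1.toList x.2.toList x.1.toList.length x.2.toList.length : Int) ≤ 2 := by omega
        exact_mod_cast this
    · intro hle p hp
      by_cases hpe : p.1 = p.2
      · exact Or.inl hpe
      · refine Or.inr ?_
        have hpf : p ∈ ps.filter (fun q => q.1 != q.2) := List.mem_filter.mpr ⟨hp, by simpa using hpe⟩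
        rw [hx] at hpf
        simp only [List.mem_singleton] at hpf
        subst hpf
        rw [pvEdist_eq]
        simp only [String.length_toList] at hle ⊢
        omega
  · rw [if_pos (by omega)]
    have hdec : (decide ((0 : Int) + (List.countP (fun p : String × String => p.1 != p.2) ps : Int) = 1)) = false := by
      simp only [decide_eq_false_iff_not]
      omega
    rw [hdec, Bool.false_and]

-- ===== VERDICT (by name: the statement is the Claim_ definition above) =====
theorem is_likely_typo_py_spec : Claim_equal_is_likely_typo_py := by
  intro path_a path_b _
  unfold Spec_is_likely_typo_py
  unfold is_likely_typo_py is_likely_typo_py_alt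
  dsimp only
  by_cases h1 : (PySem.Str.len path_a - PySem.Str.len path_b).natAbs > 2
  · rw [if_pos h1, if_pos h1]
  · rw [if_neg h1, if_neg h1]
    by_cases h2 : ((PySem.Str.split? (PySem.Str.stripChars path_a "/") "/").getD []).length ≠ ((PySem.Str.split? (PySem.Str.stripChars path_b "/") "/").getD []).length
    · rw [if_pos h2, if_pos h2]
    · rw [if_neg h2, if_neg h2]
      exact pvShell_eq _
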